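-- pv_equiv track=rewrite | github.com/NatriClorua/funtion- | funtion.py | tim_hang_co_tong_lon_nhat
-- ===== SOURCE A (Python) =====
-- def tim_hang_co_tong_lon_nhat(ma_tran):
--     max_tong = float('-inf')
--     hang_index = -1
--     for i in range (len(ma_tran)):
--         tong_hang = sum(ma_tran[i])
--         if tong_hang > max_tong:
--             max_tong = tong_hang
--             hang_index = i
--     return hang_index
-- ===== SOURCE B (Python) =====
-- def tim_hang_co_tong_lon_nhat(ma_tran):
--     if not ma_tran:
--         return -1
--     tong = [sum(hang) for hang in ma_tran]
--     return tong.index(max(tong))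
-- ===== Notes on version B (the rewrite author's own statement) =====
-- stated objective: simpler
-- what changed: Replaces the fused track-max-and-index loop over range(len) with a materialised list of row sums and a separate max + first-index lookup, with an explicit -1 guard for the empty matrix.
import Mathlib
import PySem

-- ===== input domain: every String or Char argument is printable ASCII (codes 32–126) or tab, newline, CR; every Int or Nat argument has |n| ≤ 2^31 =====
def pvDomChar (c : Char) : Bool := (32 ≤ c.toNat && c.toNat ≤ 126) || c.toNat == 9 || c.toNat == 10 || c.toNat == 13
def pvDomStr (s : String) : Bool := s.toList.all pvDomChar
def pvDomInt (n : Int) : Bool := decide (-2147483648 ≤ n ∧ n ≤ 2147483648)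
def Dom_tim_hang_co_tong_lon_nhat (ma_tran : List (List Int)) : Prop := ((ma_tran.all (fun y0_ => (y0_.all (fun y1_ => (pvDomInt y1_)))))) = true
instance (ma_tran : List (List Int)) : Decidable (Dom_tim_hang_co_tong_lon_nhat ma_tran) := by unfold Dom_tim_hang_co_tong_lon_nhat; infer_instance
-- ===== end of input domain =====

-- B materialises the table of row sums and looks up max + first index in separate passes,
-- instead of A's fused track-max-and-index scan; a simpler decomposition, not faster.

-- ===== PORT A =====
-- max_tong starts as float('-inf'): modelled as Option Int with 'none' = -inf (below every row sum);
-- the loop walks the rows keeping (hang_index, max_tong, current index i), exactly A's fused scan.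
def timALoop : List (List Int) → Int → Option Int → Int → Int
  | [], hang_index, _, _ => hang_index
  | hang :: rest, hang_index, max_tong, i =>
    let tong_hang := hang.sum
    if (match max_tong with | none => true | some m => decide (m < tong_hang)) then
      timALoop rest i (some tong_hang) (i + 1)
    else
      timALoop rest hang_index max_tong (i + 1)

def tim_hang_co_tong_lon_nhat (ma_tran : List (List Int)) : Int :=
  timALoop ma_tran (-1) none 0

-- ===== PORT B =====
-- if not ma_tran: return -1; tong = [sum(hang) for hang in ma_tran]; return tong.index(max(tong))
-- (max(tong) and tong.index never fail on a nonempty list; their Option results are matched, -1 unreachable)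
def tim_hang_co_tong_lon_nhat_alt (ma_tran : List (List Int)) : Int :=
  if ma_tran = [] then -1
  else
    let tong := ma_tran.map (fun hang => hang.sum)
    match PySem.List.max? tong (fun x => x) with
    | none => -1
    | some mx =>
      match PySem.List.index? tong mx with
      | none => -1
      | some k => (k : Int)

-- ===== PRECONDITION & SPEC =====
def Spec_tim_hang_co_tong_lon_nhat (ma_tran : List (List Int)) (out : Int) : Prop := out = tim_hang_co_tong_lon_nhat_alt ma_tran
instance (ma_tran : List (List Int)) (out : Int) : Decidable (Spec_tim_hang_co_tong_lon_nhat ma_tran out) := by unfold Spec_tim_hang_co_tong_lon_nhat; infer_instance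

-- ===== CLAIM (what is proved, stated in full; the proofs are below) =====
def Claim_equal_tim_hang_co_tong_lon_nhat : Prop := ∀ (ma_tran : List (List Int)), Dom_tim_hang_co_tong_lon_nhat ma_tran → Spec_tim_hang_co_tong_lon_nhat ma_tran (tim_hang_co_tong_lon_nhat ma_tran)

-- ===== LEMMAS AND PROOFS =====

theorem foldl_max_comm (l : List Int) : ∀ a b : Int, max a (l.foldl max b) = l.foldl max (max a b) := by
  induction l with
  | nil => intro a b; simp
  | cons x t ih =>
    intro a b
    simp only [List.foldl_cons, ih]
    rw [max_assoc]

-- A's loop after the first row has been absorbed: it returns bi if no remaining sum beats m,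
-- else i + (first index of the maximum of the remaining sums).
theorem timALoop_some (t : List (List Int)) :
    ∀ (m bi i : Int), timALoop t bi (some m) i =
      match PySem.List.max? (t.map (fun h => h.sum)) (fun x => x) with
      | none => bi
      | some mx =>
        if m < mx then i + ((PySem.List.index? (t.map (fun h => h.sum)) mx).getD 0 : Nat) else bi := by
  induction t with
  | nil => intro m bi i; simp [timALoop, PySem.List.max?]
  | cons h t ih =>
    intro m bi i
    set s0 := h.sum with hs0
    simp only [List.map_cons, PySem.List.max?_id_cons]
    by_cases hnil : t.map (fun h => h.sum) = []
    · obtain ⟨⟩ : t = [] := by cases t <;> simp_all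
      simp only [timALoop]
      by_cases hlt : m < s0
      · simp [hlt, timALoop, PySem.List.index?_cons_self]
      · simp [hlt, timALoop]
    · obtain ⟨a, rest, hL⟩ := List.exists_cons_of_ne_nil hnil
      have hmax' : PySem.List.max? (t.map (fun h => h.sum)) (fun x => x) = some (rest.foldl max a) := by
        rw [hL, PySem.List.max?_id_cons]
      set mx' : Int := rest.foldl max a with hmx'
      have hfold : (t.map (fun h => h.sum)).foldl max s0 = max s0 mx' := by
        rw [hL]; simp only [List.foldl_cons]
        rw [← foldl_max_comm]
      have hmemmx' : mx' ∈ t.map (fun h => h.sum) := PySem.List.max?_mem hmax'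
      obtain ⟨k, hk⟩ : ∃ k, PySem.List.index? (t.map (fun h => h.sum)) mx' = some k := by
        have := (PySem.List.index?_isSome_iff (t.map (fun h => h.sum)) mx').2 hmemmx'
        exact Option.isSome_iff_exists.1 this
      rw [hfold]
      simp only [timALoop]
      by_cases hlt : m < s0
      · rw [if_pos (by simpa using hlt)]
        rw [ih]
        rw [hmax']
        dsimp only
        by_cases h2 : s0 < mx'
        · have hne : s0 ≠ mx' := ne_of_lt h2
          have hmx : max s0 mx' = mx' := max_eq_right (le_of_lt h2)
          rw [hmx]
          have hmlt : m < mx' := lt_trans hlt h2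
          rw [if_pos h2, if_pos hmlt]
          rw [PySem.List.index?_cons_of_ne _ hne, hk]
          simp only [Option.map_some, Option.getD_some]
          push_cast; ring
        · have hmx : max s0 mx' = s0 := max_eq_left (le_of_not_gt h2)
          rw [hmx, if_neg h2, if_pos hlt, PySem.List.index?_cons_self]
          simp
      · rw [if_neg (by simpa using hlt)]
        rw [ih, hmax']
        dsimp only
        by_cases h2 : m < mx'
        · have h0 : s0 ≤ m := le_of_not_gt hlt
          have hne : s0 ≠ mx' := ne_of_lt (lt_of_le_of_lt h0 h2)
          have hmx : max s0 mx' = mx' := max_eq_right (le_of_lt (lt_of_le_of_lt h0 h2))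
          rw [hmx, if_pos h2, if_pos h2]
          rw [PySem.List.index?_cons_of_ne _ hne, hk]
          simp only [Option.map_some, Option.getD_some]
          push_cast; ring
        · have : ¬ m < max s0 mx' := by
            rcases max_cases s0 mx' with ⟨he, _⟩ | ⟨he, _⟩ <;> rw [he] <;> [exact hlt; exact h2]
          rw [if_neg this, if_neg h2]

theorem tim_eq_alt (ma_tran : List (List Int)) :
    tim_hang_co_tong_lon_nhat ma_tran = tim_hang_co_tong_lon_nhat_alt ma_tran := by
  cases ma_tran with
  | nil => rfl
  | cons h t =>
    unfold tim_hang_co_tong_lon_nhat tim_hang_co_tong_lon_nhat_alt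
    rw [if_neg (List.cons_ne_nil h t)]
    simp only [List.map_cons, PySem.List.max?_id_cons]
    show timALoop t 0 (some h.sum) 1 = _
    rw [timALoop_some]
    by_cases hnil : t.map (fun h => h.sum) = []
    · obtain ⟨⟩ : t = [] := by cases t <;> simp_all
      simp [PySem.List.max?, PySem.List.index?_cons_self]
    · obtain ⟨a, rest, hL⟩ := List.exists_cons_of_ne_nil hnil
      have hmax' : PySem.List.max? (t.map (fun h => h.sum)) (fun x => x) = some (rest.foldl max a) := by
        rw [hL, PySem.List.max?_id_cons]
      set mx' : Int := rest.foldl max a with hmx'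
      have hfold : (t.map (fun h => h.sum)).foldl max h.sum = max h.sum mx' := by
        rw [hL]; simp only [List.foldl_cons]
        rw [← foldl_max_comm]
      have hmemmx' : mx' ∈ t.map (fun h => h.sum) := PySem.List.max?_mem hmax'
      obtain ⟨k, hk⟩ : ∃ k, PySem.List.index? (t.map (fun h => h.sum)) mx' = some k := by
        have := (PySem.List.index?_isSome_iff (t.map (fun h => h.sum)) mx').2 hmemmx'
        exact Option.isSome_iff_exists.1 this
      rw [hmax', hfold]
      dsimp only
      by_cases h2 : h.sum < mx'
      · rw [if_pos h2, max_eq_right (le_of_lt h2),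
          PySem.List.index?_cons_of_ne _ (ne_of_lt h2), hk]
        simp only [Option.map_some, Option.getD_some]
        push_cast; ring
      · rw [if_neg h2, max_eq_left (le_of_not_gt h2), PySem.List.index?_cons_self]
        simp

-- ===== VERDICT (by name: the statement is the Claim_ definition above) =====
theorem tim_hang_co_tong_lon_nhat_spec : Claim_equal_tim_hang_co_tong_lon_nhat := by
  intro ma_tran _
  unfold Spec_tim_hang_co_tong_lon_nhat
  exact tim_eq_alt ma_tran
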